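-- pv_equiv track=rewrite | github.com/vatsalpathak/OOD-LLD | Amozon discussion/permission_assigner.py | assign_permissions_optimized
-- ===== SOURCE A (Python) =====
-- from collections import defaultdict
--
-- def assign_permissions_optimized(pairs, target):
--     tree = defaultdict(list)
--     for emp, mgr in pairs:
--         tree[mgr].append(emp)
--
--
--     memo = {}
--
--     def dfs(emp):
--         if emp in memo:
--             return memo[emp]
--         result = [emp]
--         for sub in tree[emp]:
--             result.extend(dfs(sub))
--         memo[emp] = result
--         return result
--
--     return dfs(target)
-- ===== SOURCE B (Python) =====
-- from collections import defaultdict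
--
-- def assign_permissions_optimized(pairs, target):
--     tree = defaultdict(list)
--     for emp, mgr in pairs:
--         tree[mgr].append(emp)
--     result = []
--     stack = [target]
--     while stack:
--         node = stack.pop()
--         result.append(node)
--         stack.extend(reversed(tree[node]))
--     return result
-- ===== Notes on version B (the rewrite author's own statement) =====
-- stated objective: simpler
-- what changed: Replaced the memoized recursive DFS (nested function + memo dict) by an explicit-stack iterative preorder that pushes children in reversed order; same children map, no recursion and no memo; Pre_ excludes inputs with a cycle reachable from target, where A raises RecursionError and B does not terminate.
import Mathlib
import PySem

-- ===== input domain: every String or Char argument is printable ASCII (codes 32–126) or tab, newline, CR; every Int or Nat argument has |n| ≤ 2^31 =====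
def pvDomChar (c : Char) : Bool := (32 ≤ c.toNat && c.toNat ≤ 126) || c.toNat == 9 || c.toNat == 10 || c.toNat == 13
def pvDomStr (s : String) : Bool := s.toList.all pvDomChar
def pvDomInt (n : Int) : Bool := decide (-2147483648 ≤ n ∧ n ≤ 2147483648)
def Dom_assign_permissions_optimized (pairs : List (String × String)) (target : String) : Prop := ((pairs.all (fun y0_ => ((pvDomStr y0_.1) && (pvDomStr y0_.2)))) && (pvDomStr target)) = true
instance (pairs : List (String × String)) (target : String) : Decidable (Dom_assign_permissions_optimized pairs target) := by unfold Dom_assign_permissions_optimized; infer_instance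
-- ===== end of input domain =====

-- B replaces A's memoized nested-function recursion by an explicit-stack iterative preorder
-- (simpler: no recursion, no memo); equal on all inputs where A returns (no cycle reachable
-- from target; on a reachable cycle A raises RecursionError and B loops, excluded by Pre_).

-- ===== PORT A =====
-- tree = defaultdict(list); for emp, mgr in pairs: tree[mgr].append(emp)
def buildTreeA (pairs : List (String × String)) : PySem.Dict String (List String) :=
  pairs.foldl (fun d p => d.modify p.2 [] (fun l => l ++ [p.1])) PySem.Dict.empty

-- dfs(emp) with memo; fuel only makes the recursion total in Lean: fuel exhaustion (none)
-- is exactly the RecursionError region, excluded by Pre_.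
mutual
def dfsA (tree : PySem.Dict String (List String)) :
    Nat → PySem.Dict String (List String) → String →
    Option (PySem.Dict String (List String) × List String)
  | 0, _, _ => none
  | fuel+1, memo, emp =>
    match memo.get? emp with
    | some r => some (memo, r)                   -- if emp in memo: return memo[emp]
    | none =>
      match dfsAList tree fuel memo (tree.getD emp []) [emp] with   -- result = [emp]; loop
      | none => none
      | some (m, result) => some (m.insert emp result, result)      -- memo[emp] = result
termination_by f _ _ => (f, 0)
def dfsAList (tree : PySem.Dict String (List String)) :
    Nat → PySem.Dict String (List String) → List String → List String →
    Option (PySem.Dict String (List String) × List String)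
  | _, memo, [], result => some (memo, result)
  | fuel, memo, sub :: subs, result =>
    match dfsA tree fuel memo sub with           -- result.extend(dfs(sub))
    | none => none
    | some (m, r) => dfsAList tree fuel m subs (result ++ r)
termination_by f _ subs _ => (f, subs.length + 1)
end

def assign_permissions_optimized (pairs : List (String × String)) (target : String) : List String :=
  let tree := buildTreeA pairs
  match dfsA tree (2 * pairs.length + 2) PySem.Dict.empty target with
  | some (_, r) => r
  | none => []                                   -- unreachable under Pre_ (RecursionError in Python)

-- ===== PORT B =====
def buildTreeB (pairs : List (String × String)) : PySem.Dict String (List String) :=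
  pairs.foldl (fun d p => d.modify p.2 [] (fun l => l ++ [p.1])) PySem.Dict.empty

-- while stack: node = stack.pop(); result.append(node); stack.extend(reversed(tree[node]))
-- The Lean list's HEAD is the Python list's END (the top of the stack), so
-- 'extend(reversed(children))' is 'children ++ stack'.  Fuel only for totality:
-- it bounds the iteration count and is never exhausted under Pre_.
def loopB (tree : PySem.Dict String (List String)) :
    Nat → List String → List String → List String
  | _, [], result => result
  | 0, _ :: _, result => result                  -- unreachable under Pre_
  | fuel+1, node :: stack, result =>
    loopB tree fuel (tree.getD node [] ++ stack) (result ++ [node])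

def assign_permissions_optimized_alt (pairs : List (String × String)) (target : String) : List String :=
  let tree := buildTreeB pairs
  loopB tree ((pairs.length + 1) ^ (2 * pairs.length + 2) + 1) [target] []

-- ===== PRECONDITION & SPEC =====
-- Pre_ excludes exactly the inputs on which the management graph has a cycle reachable from
-- target: there A raises RecursionError (B does not terminate either).  It is checked by a
-- closed-form certificate: a topological list L of the nodes reachable from target, each
-- node's direct reports strictly after it (pvGoodCheck), containing target.
def pvChildren (pairs : List (String × String)) (c : String) : List String :=
  (pairs.filter (fun p => p.2 == c)).map (·.1)

def pvAddNew (S : List String) (xs : List String) : List String :=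
  xs.foldl (fun acc x => if acc.contains x then acc else acc ++ [x]) S

def pvReachAux (pairs : List (String × String)) : Nat → List String → List String
  | 0, S => S
  | f+1, S => pvReachAux pairs f (pvAddNew S (S.flatMap (pvChildren pairs)))

def pvReachSet (pairs : List (String × String)) (target : String) : List String :=
  pvReachAux pairs (2 * pairs.length + 1) [target]

def pvTopoAux (pairs : List (String × String)) : Nat → List String → List String → List String
  | 0, rem, L => rem ++ L
  | f+1, rem, L =>
    let ready := rem.filter (fun x => (pvChildren pairs x).all (fun c => L.contains c))
    if ready.isEmpty then rem ++ L
    else pvTopoAux pairs f (rem.filter (fun x => !(ready.contains x))) (ready ++ L)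

def pvTopo (pairs : List (String × String)) (target : String) : List String :=
  pvTopoAux pairs (pvReachSet pairs target).length (pvReachSet pairs target) []

def pvGoodCheck (pairs : List (String × String)) : List String → Bool
  | [] => true
  | x :: L => (pvChildren pairs x).all (fun c => L.contains c) && pvGoodCheck pairs L

def Pre_assign_permissions_optimized (pairs : List (String × String)) (target : String) : Prop :=
  (pvGoodCheck pairs (pvTopo pairs target) && (pvTopo pairs target).contains target
    && decide ((pvTopo pairs target).length ≤ 2 * pairs.length + 1)) = true

instance (pairs : List (String × String)) (target : String) : Decidable (Pre_assign_permissions_optimized pairs target) := by unfold Pre_assign_permissions_optimized; infer_instance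

def pvWitness_assign_permissions_optimized : (List (String × String)) × String := ([("b", "a")], "a")

def Spec_assign_permissions_optimized (pairs : List (String × String)) (target : String) (out : List String) : Prop := out = assign_permissions_optimized_alt pairs target
instance (pairs : List (String × String)) (target : String) (out : List String) : Decidable (Spec_assign_permissions_optimized pairs target out) := by unfold Spec_assign_permissions_optimized; infer_instance

-- ===== CLAIM (what is proved, stated in full; the proofs are below) =====
def Claim_equal_assign_permissions_optimized : Prop := ∀ (pairs : List (String × String)) (target : String), Dom_assign_permissions_optimized pairs target → Pre_assign_permissions_optimized pairs target → Spec_assign_permissions_optimized pairs target (assign_permissions_optimized pairs target)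

-- ===== LEMMAS AND PROOFS =====

-- The common functional content: fuelled preorder traversal of the children map 'ch'.
mutual
def preT (ch : String → List String) : Nat → String → Option (List String)
  | 0, _ => none
  | f+1, x =>
    match preL ch f (ch x) with
    | none => none
    | some ls => some (x :: ls.flatten)
termination_by f _ => (f, 0)
def preL (ch : String → List String) : Nat → List String → Option (List (List String))
  | _, [] => some []
  | f, x :: xs =>
    match preT ch f x, preL ch f xs with
    | some l, some ls => some (l :: ls)
    | _, _ => none
termination_by f xs => (f, xs.length + 1)
end

mutual
theorem preT_mono (ch : String → List String) (f : Nat) (x : String) (l : List String)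
    (h : preT ch f x = some l) : preT ch (f+1) x = some l := by
  match f with
  | 0 => simp [preT] at h
  | f+1 =>
    rw [preT] at h ⊢
    cases hL : preL ch f (ch x) with
    | none => rw [hL] at h; simp at h
    | some ls =>
      rw [hL] at h
      rw [preL_mono ch f (ch x) ls hL]
      exact h
termination_by (f, 0)
theorem preL_mono (ch : String → List String) (f : Nat) (xs : List String) (ls : List (List String))
    (h : preL ch f xs = some ls) : preL ch (f+1) xs = some ls := by
  match xs with
  | [] => simpa [preL] using h
  | x :: xs =>
    rw [preL] at h ⊢
    cases hT : preT ch f x with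
    | none => rw [hT] at h; simp at h
    | some l =>
      rw [hT] at h
      cases hL : preL ch f xs with
      | none => rw [hL] at h; simp at h
      | some ls' =>
        rw [hL] at h
        rw [preT_mono ch f x l hT, preL_mono ch f xs ls' hL]
        exact h
termination_by (f, xs.length + 1)
end

theorem preT_mono_le (ch : String → List String) {f g : Nat} (hfg : f ≤ g) (x : String)
    (l : List String) (h : preT ch f x = some l) : preT ch g x = some l := by
  induction g, hfg using Nat.le_induction with
  | base => exact h
  | succ g _ ih => exact preT_mono ch g x l ih

theorem preT_fun (ch : String → List String) {f g : Nat} {x : String} {l r : List String}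
    (hf : preT ch f x = some l) (hg : preT ch g x = some r) : l = r := by
  rcases Nat.le_total f g with hle | hle
  · have := preT_mono_le ch hle x l hf
    rw [this] at hg; exact Option.some.inj hg
  · have := preT_mono_le ch hle x r hg
    rw [this] at hf; exact (Option.some.inj hf).symm

theorem preL_append (ch : String → List String) (f : Nat) (a b : List String)
    (la lb : List (List String)) (ha : preL ch f a = some la) (hb : preL ch f b = some lb) :
    preL ch f (a ++ b) = some (la ++ lb) := by
  induction a generalizing la with
  | nil => simp [preL] at ha; subst ha; simpa using hb
  | cons x xs ih =>
    rw [preL] at ha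
    cases hT : preT ch f x with
    | none => rw [hT] at ha; simp at ha
    | some l =>
      rw [hT] at ha
      cases hL : preL ch f xs with
      | none => rw [hL] at ha; simp at ha
      | some ls =>
        rw [hL] at ha
        cases ha
        have := ih ls hL
        rw [List.cons_append, preL, hT, this]
        rfl

-- existence of preL from pointwise existence of preT
theorem preL_of_forall (ch : String → List String) (f : Nat) (cs : List String)
    (h : ∀ c ∈ cs, ∃ l, preT ch f c = some l) : ∃ ls, preL ch f cs = some ls := by
  induction cs with
  | nil => exact ⟨[], by rw [preL]⟩
  | cons c cs ih =>
    obtain ⟨l, hl⟩ := h c (by simp)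
    obtain ⟨ls, hls⟩ := ih (fun c hc => h c (by simp [hc]))
    exact ⟨l :: ls, by rw [preL, hl, hls]⟩

-- a checked-good topological list certifies termination of the preorder traversal
theorem goodCheck_preT (pairs : List (String × String)) (L : List String)
    (hgood : pvGoodCheck pairs L = true) :
    ∀ x ∈ L, ∃ l, preT (pvChildren pairs) L.length x = some l := by
  induction L with
  | nil => intro x hx; simp at hx
  | cons a L ih =>
    rw [pvGoodCheck, Bool.and_eq_true] at hgood
    obtain ⟨hsub, hgood'⟩ := hgood
    intro x hx
    rcases List.mem_cons.mp hx with rfl | hx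
    · have hch : ∀ c ∈ pvChildren pairs x, ∃ l, preT (pvChildren pairs) L.length c = some l := by
        intro c hc
        have : L.contains c = true := by
          have := List.all_eq_true.mp hsub c hc
          simpa using this
        exact ih hgood' c (by simpa using this)
      obtain ⟨ls, hls⟩ := preL_of_forall (pvChildren pairs) L.length (pvChildren pairs x) hch
      exact ⟨x :: ls.flatten, by rw [List.length_cons, preT, hls]⟩
    · obtain ⟨l, hl⟩ := ih hgood' x hx
      exact ⟨l, by rw [List.length_cons]; exact preT_mono (pvChildren pairs) L.length x l hl⟩

-- output-size bound, used to discharge B's fuel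
mutual
theorem preT_len (ch : String → List String) (C : Nat) (hC : ∀ y, (ch y).length ≤ C)
    (f : Nat) (x : String) (l : List String) (h : preT ch f x = some l) :
    l.length ≤ (C + 1) ^ f := by
  match f with
  | 0 => simp [preT] at h
  | f+1 =>
    rw [preT] at h
    cases hL : preL ch f (ch x) with
    | none => rw [hL] at h; simp at h
    | some ls =>
      rw [hL] at h
      cases h
      have hflat := preL_len ch C hC f (ch x) ls hL
      have hone : 1 ≤ (C + 1) ^ f := Nat.one_le_pow _ _ (by omega)
      have hcs : (ch x).length * (C + 1) ^ f ≤ C * (C + 1) ^ f :=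
        Nat.mul_le_mul_right _ (hC x)
      have : (C + 1) ^ (f + 1) = (C + 1) ^ f + C * (C + 1) ^ f := by ring
      simp only [List.length_cons]
      omega
termination_by (f, 0)
theorem preL_len (ch : String → List String) (C : Nat) (hC : ∀ y, (ch y).length ≤ C)
    (f : Nat) (xs : List String) (ls : List (List String)) (h : preL ch f xs = some ls) :
    ls.flatten.length ≤ xs.length * (C + 1) ^ f := by
  match xs with
  | [] => simp [preL] at h; subst h; simp
  | x :: xs =>
    rw [preL] at h
    cases hT : preT ch f x with
    | none => rw [hT] at h; simp at h
    | some l =>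
      rw [hT] at h
      cases hL : preL ch f xs with
      | none => rw [hL] at h; simp at h
      | some ls' =>
        rw [hL] at h
        cases h
        have h1 := preT_len ch C hC f x l hT
        have h2 := preL_len ch C hC f xs ls' hL
        simp only [List.flatten_cons, List.length_append, List.length_cons]
        have : (xs.length + 1) * (C + 1) ^ f = (C + 1) ^ f + xs.length * (C + 1) ^ f := by ring
        omega
termination_by (f, xs.length + 1)
end

theorem pvChildren_len (pairs : List (String × String)) (c : String) :
    (pvChildren pairs c).length ≤ pairs.length := by
  unfold pvChildren
  simpa using List.length_filter_le _ pairs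

-- the built tree's lookups are pvChildren
theorem getD_buildTreeA (pairs : List (String × String)) (c : String) :
    (buildTreeA pairs).getD c [] = pvChildren pairs c := by
  unfold buildTreeA pvChildren
  have hsw : pairs.foldl (fun d p => d.modify p.2 [] (fun l => l ++ [p.1])) PySem.Dict.empty
      = (pairs.map Prod.swap).foldl (fun d p => d.modify p.1 [] (fun l => l ++ [p.2])) PySem.Dict.empty := by
    rw [List.foldl_map]; rfl
  rw [hsw, PySem.Dict.getD_foldl_modify_append]
  rw [List.filter_map, List.map_map]
  rfl

-- memo soundness invariant for A's dfs
def GoodMemo (ch : String → List String) (memo : PySem.Dict String (List String)) : Prop :=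
  ∀ k r, memo.get? k = some r → ∃ g, preT ch g k = some r

mutual
theorem dfsT_eq (tree : PySem.Dict String (List String)) (f : Nat) (x : String) (l : List String)
    (memo : PySem.Dict String (List String))
    (hpre : preT (fun y => tree.getD y []) f x = some l)
    (hmemo : GoodMemo (fun y => tree.getD y []) memo)
    (g : Nat) (hg : f ≤ g) :
    ∃ m', dfsA tree g memo x = some (m', l) ∧ GoodMemo (fun y => tree.getD y []) m' := by
  match f, g with
  | 0, _ => simp [preT] at hpre
  | f+1, 0 => omega
  | f+1, g+1 =>
    rw [preT] at hpre
    cases hL : preL (fun y => tree.getD y []) f (tree.getD x []) with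
    | none => rw [hL] at hpre; simp at hpre
    | some ls =>
      rw [hL] at hpre
      cases hpre
      rw [dfsA]
      cases hm : memo.get? x with
      | some r =>
        obtain ⟨h, hh⟩ := hmemo x r hm
        have hrl : r = x :: ls.flatten := by
          have hx1 : preT (fun y => tree.getD y []) (f+1) x = some (x :: ls.flatten) := by
            rw [preT, hL]
          exact preT_fun (fun y => tree.getD y []) hh hx1
        exact ⟨memo, by rw [hrl], hmemo⟩
      | none =>
        obtain ⟨m', hrun, hgood'⟩ :=
          dfsL_eq tree f (tree.getD x []) ls memo [x] hL hmemo g (by omega)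
        refine ⟨m'.insert x (x :: ls.flatten), ?_, ?_⟩
        · rw [hrun]
          rfl
        · intro k r hk
          rw [PySem.Dict.get?_insert] at hk
          by_cases hkx : k = x
          · rw [if_pos hkx] at hk
            cases hk
            subst hkx
            exact ⟨f + 1, by rw [preT, hL]⟩
          · rw [if_neg hkx] at hk
            exact hgood' k r hk
termination_by (f, 0)
theorem dfsL_eq (tree : PySem.Dict String (List String)) (f : Nat) (xs : List String)
    (ls : List (List String)) (memo : PySem.Dict String (List String)) (acc : List String)
    (hpre : preL (fun y => tree.getD y []) f xs = some ls)
    (hmemo : GoodMemo (fun y => tree.getD y []) memo)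
    (g : Nat) (hg : f ≤ g) :
    ∃ m', dfsAList tree g memo xs acc = some (m', acc ++ ls.flatten) ∧
      GoodMemo (fun y => tree.getD y []) m' := by
  match xs with
  | [] =>
    simp [preL] at hpre
    subst hpre
    exact ⟨memo, by rw [dfsAList]; simp, hmemo⟩
  | x :: xs =>
    rw [preL] at hpre
    cases hT : preT (fun y => tree.getD y []) f x with
    | none => rw [hT] at hpre; simp at hpre
    | some l =>
      rw [hT] at hpre
      cases hL : preL (fun y => tree.getD y []) f xs with
      | none => rw [hL] at hpre; simp at hpre
      | some ls' =>
        rw [hL] at hpre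
        cases hpre
        obtain ⟨m1, hrun1, hgood1⟩ := dfsT_eq tree f x l memo hT hmemo g hg
        obtain ⟨m2, hrun2, hgood2⟩ := dfsL_eq tree f xs ls' m1 (acc ++ l) hL hgood1 g hg
        refine ⟨m2, ?_, hgood2⟩
        rw [dfsAList, hrun1]
        change dfsAList tree g m1 xs (acc ++ l) = _
        rw [hrun2]
        simp
termination_by (f, xs.length + 1)
end

-- B's stack loop consumes one fuel per emitted node
theorem loopB_eq (tree : PySem.Dict String (List String)) (g : Nat) :
    ∀ (f : Nat) (stack acc : List String) (ls : List (List String)),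
      preL (fun y => tree.getD y []) f stack = some ls →
      ls.flatten.length ≤ g →
      loopB tree g stack acc = acc ++ ls.flatten := by
  induction g with
  | zero =>
    intro f stack acc ls hpre hlen
    match stack with
    | [] => simp [preL] at hpre; subst hpre; simp [loopB]
    | x :: st =>
      rw [preL] at hpre
      cases hT : preT (fun y => tree.getD y []) f x with
      | none => rw [hT] at hpre; simp at hpre
      | some l =>
        rw [hT] at hpre
        cases hL : preL (fun y => tree.getD y []) f st with
        | none => rw [hL] at hpre; simp at hpre
        | some ls' =>
          rw [hL] at hpre
          cases hpre
          match f, hT with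
          | 0, hT => simp [preT] at hT
          | f+1, hT =>
            rw [preT] at hT
            cases hcl : preL (fun y => tree.getD y []) f (tree.getD x []) with
            | none => rw [hcl] at hT; simp at hT
            | some lcs =>
              rw [hcl] at hT
              cases hT
              simp at hlen
  | succ g ih =>
    intro f stack acc ls hpre hlen
    match stack with
    | [] => simp [preL] at hpre; subst hpre; simp [loopB]
    | x :: st =>
      rw [preL] at hpre
      cases hT : preT (fun y => tree.getD y []) f x with
      | none => rw [hT] at hpre; simp at hpre
      | some l =>
        rw [hT] at hpre
        cases hL : preL (fun y => tree.getD y []) f st with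
        | none => rw [hL] at hpre; simp at hpre
        | some ls' =>
          rw [hL] at hpre
          cases hpre
          match f, hT, hL with
          | 0, hT, hL => simp [preT] at hT
          | f+1, hT, hL =>
            rw [preT] at hT
            cases hcl : preL (fun y => tree.getD y []) f (tree.getD x []) with
            | none => rw [hcl] at hT; simp at hT
            | some lcs =>
              rw [hcl] at hT
              cases hT
              rw [loopB]
              have hst' : preL (fun y => tree.getD y []) (f+1) st = some ls' := hL
              have hch' : preL (fun y => tree.getD y []) (f+1) (tree.getD x []) = some lcs :=
                preL_mono (fun y => tree.getD y []) f (tree.getD x []) lcs hcl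
              have happ := preL_append (fun y => tree.getD y []) (f+1)
                (tree.getD x []) st lcs ls' hch' hst'
              have hlen' : (lcs ++ ls').flatten.length ≤ g := by
                simp only [List.flatten_append, List.length_append] at hlen ⊢
                simp only [List.flatten_cons, List.length_append, List.length_cons] at hlen
                omega
              have := ih (f+1) (tree.getD x [] ++ st) (acc ++ [x]) (lcs ++ ls') happ hlen'
              rw [this]
              simp
theorem goodMemo_empty (ch : String → List String) :
    GoodMemo ch (PySem.Dict.empty : PySem.Dict String (List String)) := by
  intro k r hk
  simp [PySem.Dict.get?_empty] at hk

-- ===== VERDICT (by name: the statement is the Claim_ definition above) =====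
theorem assign_permissions_optimized_spec : Claim_equal_assign_permissions_optimized := by
  intro pairs target _hdom hpre
  unfold Spec_assign_permissions_optimized
  unfold Pre_assign_permissions_optimized at hpre
  rw [Bool.and_eq_true, Bool.and_eq_true] at hpre
  obtain ⟨⟨hgood, hmemT⟩, hlenL⟩ := hpre
  have hlenL' : (pvTopo pairs target).length ≤ 2 * pairs.length + 1 := of_decide_eq_true hlenL
  have htmem : target ∈ pvTopo pairs target := by
    rw [List.contains_iff_mem] at hmemT; exact hmemT
  obtain ⟨l, hl⟩ := goodCheck_preT pairs (pvTopo pairs target) hgood target htmem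
  have hchfun : (fun y => (buildTreeA pairs).getD y []) = pvChildren pairs :=
    funext (getD_buildTreeA pairs)
  have hlA : preT (fun y => (buildTreeA pairs).getD y []) (pvTopo pairs target).length target = some l := by
    rw [hchfun]; exact hl
  -- A's side
  have hA : assign_permissions_optimized pairs target = l := by
    obtain ⟨m', hrun, _⟩ := dfsT_eq (buildTreeA pairs) (pvTopo pairs target).length target l
      PySem.Dict.empty hlA (goodMemo_empty _) (2 * pairs.length + 2) (by omega)
    have hdef : assign_permissions_optimized pairs target
        = match dfsA (buildTreeA pairs) (2 * pairs.length + 2) PySem.Dict.empty target with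
          | some (_, r) => r
          | none => [] := rfl
    rw [hdef, hrun]
  -- B's side
  have hB : assign_permissions_optimized_alt pairs target = l := by
    have hBtree : buildTreeB pairs = buildTreeA pairs := rfl
    have hsingle : preL (fun y => (buildTreeA pairs).getD y [])
        (pvTopo pairs target).length [target] = some [l] := by
      rw [preL, hlA, preL]
    have hbound : ([l] : List (List String)).flatten.length
        ≤ (pairs.length + 1) ^ (2 * pairs.length + 2) + 1 := by
      have h1 : l.length ≤ (pairs.length + 1) ^ (pvTopo pairs target).length := by
        have := preT_len (pvChildren pairs) pairs.length (pvChildren_len pairs)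
          (pvTopo pairs target).length target l hl
        simpa using this
      have h2 : (pairs.length + 1) ^ (pvTopo pairs target).length
          ≤ (pairs.length + 1) ^ (2 * pairs.length + 2) :=
        Nat.pow_le_pow_right (by omega) (by omega)
      simp only [List.flatten_cons, List.flatten_nil, List.append_nil]
      omega
    have := loopB_eq (buildTreeA pairs) ((pairs.length + 1) ^ (2 * pairs.length + 2) + 1)
      (pvTopo pairs target).length [target] [] [l] hsingle hbound
    have hdef : assign_permissions_optimized_alt pairs target
        = loopB (buildTreeB pairs) ((pairs.length + 1) ^ (2 * pairs.length + 2) + 1) [target] [] := rfl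
    rw [hdef, hBtree, this]
    simp
  rw [hA, hB]
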